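-- pv_equiv track=rewrite | github.com/r-vlasov/ct_project | attacks.py | check_is_superincr
-- ===== SOURCE A (Python) =====
-- def check_is_superincr(seq):
--     n = len(seq)
--     s = seq[0]
--     for i in range(1, n):
--         if seq[i] > s:
--             s += seq[i]
--         else:
--             return False
--     return True
-- ===== SOURCE B (Python) =====
-- def check_is_superincr(seq):
--     remaining = sum(seq)
--     ok = True
--     for x in reversed(seq[1:]):
--         remaining -= x
--         ok = ok and x > remaining
--     return ok
-- ===== Notes on version B (the rewrite author's own statement) =====
-- stated objective: alternative
-- what changed: A accumulates a running sum forward from the first element and exits early; B computes the grand total once and traverses the list backwards, subtracting each element to recover the prefix sum it must exceed, folding the checks with no early exit (order-reversal is sound because the result is a conjunction).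
-- outside the precondition, e.g. on check_is_superincr([]): A raises IndexError, B returns True
import Mathlib
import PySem

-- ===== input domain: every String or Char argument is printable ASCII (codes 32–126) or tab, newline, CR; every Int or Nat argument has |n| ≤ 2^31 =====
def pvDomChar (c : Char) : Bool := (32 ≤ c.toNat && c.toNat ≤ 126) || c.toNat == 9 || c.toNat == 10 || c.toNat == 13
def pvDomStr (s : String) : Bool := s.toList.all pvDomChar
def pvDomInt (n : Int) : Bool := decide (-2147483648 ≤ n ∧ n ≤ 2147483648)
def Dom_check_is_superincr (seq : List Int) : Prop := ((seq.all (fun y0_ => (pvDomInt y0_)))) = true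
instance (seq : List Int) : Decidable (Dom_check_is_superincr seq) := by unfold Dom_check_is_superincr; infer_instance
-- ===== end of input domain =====

-- B replaces A's forward running-sum loop (early exit) by a reverse traversal that subtracts from the
-- precomputed total; Pre_ excludes the empty list, on which A raises IndexError (B happens to return True).


-- ===== PORT A =====
-- A's loop: s starts at the first element; each later element must exceed the running sum s (early False).
def checkLoopA (s : Int) (rest : List Int) : Bool :=
  match rest with
  | [] => true
  | x :: xs => if x > s then checkLoopA (s + x) xs else false

def check_is_superincr (seq : List Int) : Bool :=
  match seq with
  | [] => false          -- A raises IndexError here (first-element index); excluded by Pre_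
  | h :: t => checkLoopA h t

-- ===== PORT B =====
-- Source B: remaining = sum(seq); for x in reversed(seq[1:]): remaining -= x; ok = ok and x > remaining.
-- State is the pair (remaining, ok); seq[1:] is List.drop 1, reversed(…) is List.reverse.
def check_is_superincr_alt (seq : List Int) : Bool :=
  (((seq.drop 1).reverse).foldl
      (fun st x => (st.1 - x, st.2 && decide (x > st.1 - x)))
      (seq.sum, true)).2

-- ===== PRECONDITION & SPEC =====
-- A indexes the first element, so it raises IndexError on the empty list; nothing else is excluded.
def Pre_check_is_superincr (seq : List Int) : Prop := seq ≠ []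
instance (seq : List Int) : Decidable (Pre_check_is_superincr seq) := by unfold Pre_check_is_superincr; infer_instance
def pvWitness_check_is_superincr : List Int := [1, 2, 4]

def Spec_check_is_superincr (seq : List Int) (out : Bool) : Prop := out = check_is_superincr_alt seq
instance (seq : List Int) (out : Bool) : Decidable (Spec_check_is_superincr seq out) := by unfold Spec_check_is_superincr; infer_instance

-- ===== CLAIM (what is proved, stated in full; the proofs are below) =====
def Claim_equal_check_is_superincr : Prop := ∀ (seq : List Int), Dom_check_is_superincr seq → Pre_check_is_superincr seq → Spec_check_is_superincr seq (check_is_superincr seq)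

-- ===== LEMMAS AND PROOFS =====
-- Peeling one element off the END of A's loop input.
theorem checkLoopA_snoc (t : List Int) : ∀ (h x : Int),
    checkLoopA h (t ++ [x]) = (checkLoopA h t && decide (x > h + t.sum)) := by
  induction t with
  | nil => intro h x; simp [checkLoopA]
  | cons y ys ih =>
      intro h x
      simp only [List.cons_append, checkLoopA]
      by_cases hy : y > h
      · simp [hy, ih, add_assoc]
      · simp [hy]

-- Invariant of B's backward fold: started at (h + t.sum, b), its flag is b && (A's forward loop).
theorem foldB_inv (t : List Int) : ∀ (h : Int) (b : Bool),
    ((t.reverse).foldl (fun st x => (st.1 - x, st.2 && decide (x > st.1 - x)))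
        (h + t.sum, b)).2 = (b && checkLoopA h t) := by
  induction t using List.reverseRecOn with
  | nil => intro h b; simp [checkLoopA]
  | append_singleton ys x ih =>
      intro h b
      rw [checkLoopA_snoc]
      have hsum : h + (ys ++ [x]).sum - x = h + ys.sum := by
        rw [List.sum_append, List.sum_cons, List.sum_nil]; ring
      simp only [List.reverse_append, List.reverse_singleton, List.singleton_append,
        List.foldl_cons, hsum]
      rw [ih h (b && decide (x > h + ys.sum))]
      rw [Bool.and_assoc, Bool.and_comm (decide (x > h + ys.sum))]

-- ===== VERDICT (by name: the statement is the Claim_ definition above) =====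
theorem check_is_superincr_spec : Claim_equal_check_is_superincr := by
  intro seq _ hpre
  unfold Spec_check_is_superincr check_is_superincr check_is_superincr_alt
  match seq with
  | [] => exact absurd rfl hpre
  | h :: t =>
      have := foldB_inv t h true
      simpa using this.symm
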